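-- pv_equiv track=rewrite | github.com/vaibhav-jain-dev/learning-algo | problems/200-must-solve/arrays/19-largest-range/similar/03-largest-range-after-addition/python_code.py | largest_range_after_addition_v2
-- ===== SOURCE A (Python) =====
-- from typing import List
--
-- def largest_range_after_addition_v2(nums: List[int], k: int) -> int:
--     """
--     Alternative implementation with clearer logic.
--
--     Args:
--         nums: List of integers
--         k: Maximum number of elements to add
--
--     Returns:
--         Length of largest possible consecutive range
--     """
--     if not nums:
--         return k
--
--     sorted_nums = sorted(set(nums))
--     n = len(sorted_nums)
--
--     max_length = 1
--     left = 0
--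
--     for right in range(n):
--         # Shrink window if too many gaps
--         while sorted_nums[right] - sorted_nums[left] > (right - left) + k:
--             left += 1
--
--         # The consecutive range would be from sorted_nums[left] to sorted_nums[right]
--         # Plus up to k additional elements
--         range_size = sorted_nums[right] - sorted_nums[left] + 1
--
--         # But we can't exceed our available elements plus k additions
--         max_possible = (right - left + 1) + k
--         actual_length = min(range_size, max_possible)
--
--         max_length = max(max_length, actual_length)
--
--     return max_length
-- ===== SOURCE B (Python) =====
-- from bisect import bisect_left
-- from typing import List
--
-- def largest_range_after_addition_v2(nums: List[int], k: int) -> int: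
--     if not nums:
--         return k
--
--     sorted_nums = sorted(set(nums))
--     n = len(sorted_nums)
--     # g is non-decreasing; the window [left, right] is valid iff g[left] >= g[right] - k
--     g = [v - i for i, v in enumerate(sorted_nums)]
--
--     max_length = 1
--     for right in range(n):
--         left = bisect_left(g, g[right] - k, 0, right + 1)
--         max_length = max(max_length, sorted_nums[right] - sorted_nums[left] + 1)
--
--     return max_length
-- ===== Notes on version B (the rewrite author's own statement) =====
-- stated objective: alternative
-- what changed: Replaces A's stateful two-pointer sliding window (inner while-loop shrinking `left`) by a per-index binary search: on the non-decreasing gap array g[i] = sorted_nums[i] - i, the smallest valid left endpoint for each right is found with bisect_left, so no window state is carried between iterations.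
import Mathlib
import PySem

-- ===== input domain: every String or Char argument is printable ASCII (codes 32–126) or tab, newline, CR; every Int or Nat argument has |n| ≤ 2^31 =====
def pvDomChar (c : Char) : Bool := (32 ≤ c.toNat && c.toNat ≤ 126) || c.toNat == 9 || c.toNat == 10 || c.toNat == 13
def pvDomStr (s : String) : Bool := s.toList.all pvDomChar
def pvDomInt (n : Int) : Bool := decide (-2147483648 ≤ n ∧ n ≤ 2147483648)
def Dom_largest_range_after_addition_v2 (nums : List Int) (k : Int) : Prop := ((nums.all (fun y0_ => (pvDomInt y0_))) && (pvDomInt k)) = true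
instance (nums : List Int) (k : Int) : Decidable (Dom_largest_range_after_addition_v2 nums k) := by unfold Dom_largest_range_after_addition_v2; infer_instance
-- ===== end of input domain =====

-- B replaces A's two-pointer sliding window by a per-index binary search (bisect_left on the
-- non-decreasing gap array g[i] = sorted_nums[i] - i); equivalence of return values is proved on Pre_.

-- ===== PORT A =====
-- A's inner while-loop: advances `left` while the window has too many gaps.
-- Fuel `r + 1 - left` suffices: under Pre_ (0 ≤ k) the loop stops at left ≤ r.
-- List.getD is exact for Python's sorted_nums[i] here: all indices reached under Pre_ are in range.
def pvWhileA (s : List Int) (k : Int) (r : Nat) : Nat → Nat → Nat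
  | 0, l => l
  | fuel + 1, l =>
    if s.getD r 0 - s.getD l 0 > ((r : Int) - (l : Int)) + k then
      pvWhileA s k r fuel (l + 1)
    else l

def largest_range_after_addition_v2 (nums : List Int) (k : Int) : Int :=
  if nums = [] then k
  else
    let s := PySem.List.sorted (PySem.Set.ofList nums) (fun x => x)
    let n := s.length
    ((List.range n).foldl (fun (st : Int × Nat) r =>
      let left := pvWhileA s k r (r + 1 - st.2) st.2
      let rangeSize := s.getD r 0 - s.getD left 0 + 1
      let maxPossible := ((r : Int) - (left : Int) + 1) + k
      let actualLength := min rangeSize maxPossible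
      (max st.1 actualLength, left)) (1, 0)).1

-- ===== PORT B =====
def largest_range_after_addition_v2_alt (nums : List Int) (k : Int) : Int :=
  if nums = [] then k
  else
    let s := PySem.List.sorted (PySem.Set.ofList nums) (fun x => x)
    let n := s.length
    let g := (List.range n).map (fun i => s.getD i 0 - (i : Int))
    (List.range n).foldl (fun (m : Int) r =>
      -- bisect.bisect_left(g, g[right] - k, 0, right + 1) = stdlib bisect on the prefix g[:right+1]
      let left := PySem.List.bisectLeft (g.take (r + 1)) (g.getD r 0 - k)
      max m (s.getD r 0 - s.getD left 0 + 1)) 1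

-- ===== PRECONDITION & SPEC =====
-- Pre_ excludes only inputs on which A raises IndexError: for every nonempty nums and k < 0 the
-- while-loop's valid-window condition can never be met, so `left` runs past the end of the list.
def Pre_largest_range_after_addition_v2 (nums : List Int) (k : Int) : Prop :=
  nums = [] ∨ 0 ≤ k
instance (nums : List Int) (k : Int) : Decidable (Pre_largest_range_after_addition_v2 nums k) := by
  unfold Pre_largest_range_after_addition_v2; infer_instance

def pvWitness_largest_range_after_addition_v2 : List Int × Int := ([1, 2, 5], 1)

def Spec_largest_range_after_addition_v2 (nums : List Int) (k : Int) (out : Int) : Prop :=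
  out = largest_range_after_addition_v2_alt nums k
instance (nums : List Int) (k : Int) (out : Int) : Decidable (Spec_largest_range_after_addition_v2 nums k out) := by
  unfold Spec_largest_range_after_addition_v2; infer_instance

-- ===== CLAIM (what is proved, stated in full; the proofs are below) =====
def Claim_equal_largest_range_after_addition_v2 : Prop := ∀ (nums : List Int) (k : Int), Dom_largest_range_after_addition_v2 nums k → Pre_largest_range_after_addition_v2 nums k → Spec_largest_range_after_addition_v2 nums k (largest_range_after_addition_v2 nums k)

-- ===== LEMMAS AND PROOFS =====

-- A window [l, r] is valid: the values fit after at most k additions (Bool for Nat.find).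
def pvValid (s : List Int) (k : Int) (r l : Nat) : Bool :=
  decide (s.getD r 0 - s.getD l 0 ≤ ((r : Int) - (l : Int)) + k)

lemma pvValid_self (s : List Int) (k : Int) (r : Nat) (hk : 0 ≤ k) : pvValid s k r r = true := by
  simp only [pvValid, decide_eq_true_eq]; omega

-- Least valid left endpoint for a given right endpoint.
def pvMinL (s : List Int) (k : Int) (r : Nat) : Nat :=
  if hk : 0 ≤ k then @Nat.find (fun l => pvValid s k r l = true) (fun _ => instDecidableEqBool _ _) ⟨r, pvValid_self s k r hk⟩ else 0

lemma pvMinL_valid (s : List Int) (k : Int) (r : Nat) (hk : 0 ≤ k) :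
    pvValid s k r (pvMinL s k r) = true := by
  unfold pvMinL
  rw [dif_pos hk]
  exact Nat.find_spec (p := fun l => pvValid s k r l = true) _

lemma pvMinL_least (s : List Int) (k : Int) (r l : Nat) (hk : 0 ≤ k)
    (hl : l < pvMinL s k r) : ¬ pvValid s k r l = true := by
  unfold pvMinL at hl
  rw [dif_pos hk] at hl
  exact Nat.find_min (p := fun l => pvValid s k r l = true) _ hl

lemma pvMinL_le_of_valid (s : List Int) (k : Int) (r l : Nat) (hk : 0 ≤ k)
    (hl : pvValid s k r l = true) : pvMinL s k r ≤ l := by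
  unfold pvMinL
  rw [dif_pos hk]
  exact Nat.find_min' (p := fun l => pvValid s k r l = true) _ hl

lemma pvMinL_le (s : List Int) (k : Int) (r : Nat) (hk : 0 ≤ k) : pvMinL s k r ≤ r :=
  pvMinL_le_of_valid s k r r hk (pvValid_self s k r hk)

-- Strictly increasing lists: values grow at least by one per step.
lemma pvGetD_gap (s : List Int) (hs : s.Pairwise (· < ·)) :
    ∀ i j : Nat, i ≤ j → j < s.length → s.getD i 0 + ((j : Int) - (i : Int)) ≤ s.getD j 0 := by
  intro i j hij hj
  induction j with
  | zero =>
    have : i = 0 := Nat.le_zero.mp hij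
    subst this; simp
  | succ j ih =>
    rcases Nat.lt_or_ge i (j + 1) with hlt | hge
    · have hij' : i ≤ j := Nat.lt_succ_iff.mp hlt
      have hj' : j < s.length := Nat.lt_of_succ_lt hj
      have h1 := ih hij' hj'
      have h2 : s[j] < s[j + 1] :=
        (List.pairwise_iff_getElem.mp hs) j (j + 1) hj' hj (Nat.lt_succ_self j)
      rw [List.getD_eq_getElem s 0 hj'] at h1
      rw [List.getD_eq_getElem s 0 hj]
      push_cast
      omega
    · have : i = j + 1 := Nat.le_antisymm hij hge
      subst this
      omega

-- Validity in "gap array" form.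
lemma pvValid_iff_g (s : List Int) (k : Int) (r l : Nat) :
    pvValid s k r l = true ↔ (s.getD r 0 - (r : Int)) - k ≤ s.getD l 0 - (l : Int) := by
  simp only [pvValid, decide_eq_true_eq]; omega

-- pvMinL is monotone in r (for in-range r's on a strictly increasing list).
lemma pvMinL_mono (s : List Int) (k : Int) (hs : s.Pairwise (· < ·)) (r r' : Nat)
    (hk : 0 ≤ k) (hrr : r ≤ r') (hr' : r' < s.length) :
    pvMinL s k r ≤ pvMinL s k r' := by
  apply pvMinL_le_of_valid s k r _ hk
  have hv' := (pvValid_iff_g s k r' (pvMinL s k r')).mp (pvMinL_valid s k r' hk)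
  have hgap := pvGetD_gap s hs r r' hrr hr'
  exact (pvValid_iff_g s k r (pvMinL s k r')).mpr (by omega)

-- The while-loop reaches exactly pvMinL when started at or below it with enough fuel.
lemma pvWhileA_eq (s : List Int) (k : Int) (r : Nat) (hk : 0 ≤ k) :
    ∀ (fuel l0 : Nat), l0 ≤ pvMinL s k r → pvMinL s k r - l0 ≤ fuel →
      pvWhileA s k r fuel l0 = pvMinL s k r := by
  intro fuel
  induction fuel with
  | zero =>
    intro l0 h1 h2
    have : l0 = pvMinL s k r := by omega
    simpa [pvWhileA] using this
  | succ fuel ih =>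
    intro l0 h1 h2
    rcases Nat.lt_or_ge l0 (pvMinL s k r) with hlt | hge
    · have hnv := pvMinL_least s k r l0 hk hlt
      simp only [pvValid, decide_eq_true_eq] at hnv
      unfold pvWhileA
      rw [if_pos (by omega)]
      exact ih (l0 + 1) hlt (by omega)
    · have heq : l0 = pvMinL s k r := Nat.le_antisymm h1 hge
      have hv := pvMinL_valid s k r hk
      simp only [pvValid, decide_eq_true_eq] at hv
      unfold pvWhileA
      rw [if_neg (by rw [heq]; omega)]
      exact heq

-- The binary search finds exactly pvMinL.
lemma pvBisect_eq (s : List Int) (k : Int) (hs : s.Pairwise (· < ·)) (r : Nat)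
    (hk : 0 ≤ k) (hr : r < s.length) :
    PySem.List.bisectLeft (((List.range' 0 s.length).map (fun i => s.getD i 0 - (i : Int))).take (r + 1))
      (((List.range' 0 s.length).map (fun i => s.getD i 0 - (i : Int))).getD r 0 - k)
      = pvMinL s k r := by
  set g := (List.range' 0 s.length).map (fun i => s.getD i 0 - (i : Int)) with hg
  have hglen : g.length = s.length := by simp [hg]
  have hgel : ∀ (j : Nat) (hj : j < s.length), g[j]'(by omega) = s.getD j 0 - (j : Int) := by
    intro j hj
    simp only [hg, List.getElem_map, List.getElem_range']
    rw [List.getD_eq_getElem s 0 hj]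
    simp [List.getElem?_eq_getElem hj]
  set xs := g.take (r + 1) with hxs
  have hxlen : xs.length = r + 1 := by simp [hxs, hglen]; omega
  have hxel : ∀ (j : Nat) (hj : j < r + 1), xs[j]'(by omega) = s.getD j 0 - (j : Int) := by
    intro j hj
    simp only [hxs, List.getElem_take]
    exact hgel j (by omega)
  have hx : g.getD r 0 - k = (s.getD r 0 - (r : Int)) - k := by
    rw [List.getD_eq_getElem g 0 (by omega), hgel r hr]
  have hpw : xs.Pairwise (· ≤ ·) := by
    apply List.pairwise_iff_getElem.mpr
    intro i j hi hj hij
    rw [hxel i (by omega), hxel j (by omega)]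
    have := pvGetD_gap s hs i j (by omega) (by omega)
    omega
  obtain ⟨hble, hlt, hge⟩ := PySem.List.bisectLeft_spec xs (g.getD r 0 - k) hpw
  set b := PySem.List.bisectLeft xs (g.getD r 0 - k) with hb
  have hbr : b ≤ r := by
    by_contra hc
    have hbeq : b = r + 1 := by omega
    have := hlt r (by omega) (by omega)
    rw [hxel r (by omega), hx] at this
    omega
  apply Nat.le_antisymm
  · by_contra hc
    push Not at hc
    have hml : pvMinL s k r < b := hc
    have := hlt (pvMinL s k r) (by omega) (by omega)
    rw [hxel (pvMinL s k r) (by omega), hx] at this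
    have hv := (pvValid_iff_g s k r (pvMinL s k r)).mp (pvMinL_valid s k r hk)
    omega
  · apply pvMinL_le_of_valid s k r b hk
    have := hge b (by omega) (Nat.le_refl b)
    rw [hxel b (by omega), hx] at this
    exact (pvValid_iff_g s k r b).mpr (by omega)

-- Joint induction over the index range: A's fold (carrying left) equals B's fold.
lemma pvFold_eq (s : List Int) (k : Int) (hs : s.Pairwise (· < ·)) (hk : 0 ≤ k) :
    ∀ (c a : Nat) (m : Int) (l0 : Nat), a + c = s.length →
      (c ≠ 0 → l0 ≤ pvMinL s k a) →
      ((List.range' a c).foldl (fun (st : Int × Nat) r =>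
        let left := pvWhileA s k r (r + 1 - st.2) st.2
        let rangeSize := s.getD r 0 - s.getD left 0 + 1
        let maxPossible := ((r : Int) - (left : Int) + 1) + k
        let actualLength := min rangeSize maxPossible
        (max st.1 actualLength, left)) (m, l0)).1
      = (List.range' a c).foldl (fun (m : Int) r =>
          let left := PySem.List.bisectLeft
            (((List.range' 0 s.length).map (fun i => s.getD i 0 - (i : Int))).take (r + 1))
            (((List.range' 0 s.length).map (fun i => s.getD i 0 - (i : Int))).getD r 0 - k)
          max m (s.getD r 0 - s.getD left 0 + 1)) m := by
  intro c
  induction c with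
  | zero => intro a m l0 _ _; simp
  | succ c ih =>
    intro a m l0 ha hl0
    have ha' : a < s.length := by omega
    have hml : pvMinL s k a ≤ a := pvMinL_le s k a hk
    have hl0' : l0 ≤ pvMinL s k a := hl0 (by omega)
    have hwa : pvWhileA s k a (a + 1 - l0) l0 = pvMinL s k a :=
      pvWhileA_eq s k a hk (a + 1 - l0) l0 hl0' (by omega)
    have hbis := pvBisect_eq s k hs a hk ha'
    have hv : s.getD a 0 - s.getD (pvMinL s k a) 0 ≤ ((a : Int) - (pvMinL s k a : Int)) + k := by
      have := pvMinL_valid s k a hk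
      simpa only [pvValid, decide_eq_true_eq] using this
    have hmin : min (s.getD a 0 - s.getD (pvMinL s k a) 0 + 1)
        (((a : Int) - ((pvMinL s k a : Nat) : Int) + 1) + k)
        = s.getD a 0 - s.getD (pvMinL s k a) 0 + 1 := by omega
    rw [List.range'_succ]
    simp only [List.foldl_cons]
    rw [hwa, hbis, hmin]
    exact ih (a + 1) (max m (s.getD a 0 - s.getD (pvMinL s k a) 0 + 1)) (pvMinL s k a)
      (by omega)
      (fun hc => pvMinL_mono s k hs a (a + 1) hk (by omega) (by omega))

-- ===== VERDICT (by name: the statement is the Claim_ definition above) =====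
theorem largest_range_after_addition_v2_spec : Claim_equal_largest_range_after_addition_v2 := by
  intro nums k _ hpre
  unfold Spec_largest_range_after_addition_v2
  unfold largest_range_after_addition_v2 largest_range_after_addition_v2_alt
  by_cases hnil : nums = []
  · simp [hnil]
  · have hk : 0 ≤ k := hpre.resolve_left hnil
    simp only [if_neg hnil]
    have hs := PySem.List.sorted_ofList_pairwise_lt (xs := nums)
    rw [List.range_eq_range']
    exact pvFold_eq _ k hs hk _ 0 1 0 (Nat.zero_add _) (fun _ => Nat.zero_le _)
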